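-- pv_equiv track=rewrite | github.com/AnaCarolinaRodriguesLeite/Projeto-de-Algoritmo | PA/Jogo das pontes_1/teste_net.py | bfs
-- ===== SOURCE A (Python) =====
-- def bfs(graph, start, word, length):
--     queue = [(start, [start])]
--     while queue:
--         (vertex, path) = queue.pop(0)
--         for next in set(graph[vertex]) - set(path):
--             if len(path) == length - 1 and next == word[length - 1]:
--                 return True
--             else:
--                 queue.append((next, path + [next]))
--     return False
-- ===== SOURCE B (Python) =====
-- def bfs(graph, start, word, length):
--     # Depth-limited search: only extends paths while they are shorter than length-1
--     # vertices, keeps the path as a set plus a depth counter, and tests the target by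
--     # membership at the cutoff instead of per-child equality checks.
--     stack = [(start, {start}, 1)]
--     while stack:
--         vertex, visited, depth = stack.pop()
--         nxts = set(graph[vertex]) - visited
--         if depth == length - 1:
--             if word[length - 1] in nxts:
--                 return True
--         else:
--             for n in nxts:
--                 stack.append((n, visited | {n}, depth + 1))
--     return False
-- ===== Notes on version B (the rewrite author's own statement) =====
-- stated objective: faster
-- what changed: A breadth-first-enumerates every simple path of every length with a FIFO queue of (vertex, path-list) and a goal test on each generated child; B does a depth-limited search with an explicit stack of (vertex, visited-set, depth) that stops extending paths at depth length-1 and tests the target by one set-membership query there, so paths longer than the requested length are never explored and no path lists are copied.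
-- outside the precondition, e.g. on bfs({'a': ['b'], 'b': ['a']}, 'a', 'x', 3): A returns False, B raises IndexError; on bfs({'a': ['b'], 'b': []}, 'a', 'xy', 3): A returns False, B raises IndexError; on bfs({'a': ['b', 'c'], 'b': []}, 'a', 'ab', 2): A returns True, B returns True
import Mathlib
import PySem

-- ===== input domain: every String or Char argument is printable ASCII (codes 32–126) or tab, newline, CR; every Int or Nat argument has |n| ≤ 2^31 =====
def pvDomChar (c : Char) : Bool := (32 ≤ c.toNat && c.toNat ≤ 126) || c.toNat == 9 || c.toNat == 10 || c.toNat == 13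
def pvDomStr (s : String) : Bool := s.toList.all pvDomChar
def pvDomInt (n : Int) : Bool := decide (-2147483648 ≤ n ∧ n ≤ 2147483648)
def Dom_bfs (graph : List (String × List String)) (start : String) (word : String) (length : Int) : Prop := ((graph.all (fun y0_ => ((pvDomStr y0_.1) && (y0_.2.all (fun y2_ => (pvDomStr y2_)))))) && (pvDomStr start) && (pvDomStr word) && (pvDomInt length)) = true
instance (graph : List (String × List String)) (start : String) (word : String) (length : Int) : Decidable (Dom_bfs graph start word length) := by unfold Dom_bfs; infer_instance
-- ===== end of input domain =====

-- B replaces A's breadth-first enumeration of ALL simple paths (FIFO queue of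
-- (vertex, path-list), goal test on every generated child) by a depth-limited search:
-- a stack of (vertex, visited-set, depth) that stops extending paths at depth
-- length-1 and tests the target by one set-membership query there.
-- Return value only; neither version mutates its arguments.

-- fuel bound shared by both loop guards: strictly more than any possible number of
-- worklist pops (the search only ever moves to vertices from the value lists of graph)
def pvSearchFuel (graph : List (String × List String)) : Nat :=
  ((graph.map Prod.snd).flatten.dedup.length + 1) ^ ((graph.map Prod.snd).flatten.dedup.length + 1)

-- ===== PORT A =====
-- 'len(path) == length - 1 and next == word[length - 1]'  (word[length-1] is a 1-char string)
def hitA (word : String) (length : Int) (path : List String) (n : String) : Bool :=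
  ((path.length : Int) == length - 1) && ((PySem.Str.pyGet? word (length - 1)).map String.singleton == some n)

-- the inner 'for next in set(graph[vertex]) - set(path)' loop:
-- none = 'return True' fired; some q = loop finished, q the queue with the appended states
def bfsScan (word : String) (length : Int) (path : List String) :
    List String → List (String × List String) → Option (List (String × List String))
  | [], q => some q
  | n :: cs, q =>
    if hitA word length path n then none
    else bfsScan word length path cs (q ++ [(n, path ++ [n])])

-- the 'while queue' loop; queue.pop(0) = head.  Fuel is a totality guard only:
-- pvSearchFuel graph bounds the number of pops (proved in the lemmas below).
def bfsLoop (graph : List (String × List String)) (word : String) (length : Int) :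
    Nat → List (String × List String) → Bool
  | 0, _ => false
  | _ + 1, [] => false
  | fuel + 1, (vertex, path) :: rest =>
    match bfsScan word length path
        (PySem.Set.diff (PySem.Set.ofList ((PySem.Dict.mk graph).getD vertex [])) path) rest with
    | none => true
    | some q => bfsLoop graph word length fuel q

def bfs (graph : List (String × List String)) (start : String) (word : String) (length : Int) : Bool :=
  bfsLoop graph word length (pvSearchFuel graph) [(start, [start])]

-- ===== PORT B =====
-- the 'while stack' loop of Source B; stack.pop() takes the most recently pushed state,
-- so the stack is a cons-list with its top at the head.  Fuel is a totality guard only.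
def dlsLoop (graph : List (String × List String)) (word : String) (length : Int) :
    Nat → List (String × PySem.Set String × Int) → Bool
  | 0, _ => false
  | _ + 1, [] => false
  | fuel + 1, (vertex, visited, depth) :: stack =>
    let nxts := PySem.Set.diff (PySem.Set.ofList ((PySem.Dict.mk graph).getD vertex [])) visited
    if depth == length - 1 then
      -- 'if word[length - 1] in nxts: return True'  (pyGet? = none is Python's IndexError, outside Pre_)
      match PySem.Str.pyGet? word (length - 1) with
      | some c =>
        if PySem.Set.contains nxts (String.singleton c) then true
        else dlsLoop graph word length fuel stack
      | none => dlsLoop graph word length fuel stack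
    else
      dlsLoop graph word length fuel
        (nxts.foldl (fun st n => (n, PySem.Set.add visited n, depth + 1) :: st) stack)

def bfs_alt (graph : List (String × List String)) (start : String) (word : String) (length : Int) : Bool :=
  dlsLoop graph word length (pvSearchFuel graph) [(start, PySem.Set.ofList [start], 1)]

-- ===== PRECONDITION & SPEC =====
-- every vertex reachable from start (the saturated neighbour closure; enough
-- iterations to exceed any distance in the graph)
def pvReach (graph : List (String × List String)) (start : String) : List String :=
  (fun s => PySem.Set.update s (s.flatMap (fun v => (PySem.Dict.mk graph).getD v [])))^[graph.length + (graph.map Prod.snd).flatten.length + 1]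
    (PySem.Set.ofList [start])

-- Pre_ excludes what makes Python A raise, slightly over-approximated in closed form:
-- a KeyError happens when a vertex reachable from start is not a key of graph (kept
-- out even when the search would return True before looking it up), the lazy
-- word[length-1] IndexError is possible only when a simple path of length-1 vertices
-- can exist at all, i.e. when 2 ≤ length ≤ |keys|+1 (kept out even when no such path
-- exists), and duplicate keys are excluded because the Python dict keeps the last
-- value where the association list's first match is read.
def Pre_bfs (graph : List (String × List String)) (start : String) (word : String) (length : Int) : Prop :=
  (graph.map Prod.fst).Nodup ∧
  (∀ v ∈ pvReach graph start, v ∈ graph.map Prod.fst) ∧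
  (2 ≤ length → length ≤ (graph.length : Int) + 1 → length ≤ (word.toList.length : Int))
instance (graph : List (String × List String)) (start : String) (word : String) (length : Int) : Decidable (Pre_bfs graph start word length) := by unfold Pre_bfs; infer_instance

def pvWitness_bfs : (List (String × List String)) × String × String × Int :=
  ([("a", ["b"]), ("b", [])], "a", "ab", 2)

def Spec_bfs (graph : List (String × List String)) (start : String) (word : String) (length : Int) (out : Bool) : Prop := out = bfs_alt graph start word length
instance (graph : List (String × List String)) (start : String) (word : String) (length : Int) (out : Bool) : Decidable (Spec_bfs graph start word length out) := by unfold Spec_bfs; infer_instance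

-- ===== CLAIM (what is proved, stated in full; the proofs are below) =====
def Claim_equal_bfs : Prop := ∀ (graph : List (String × List String)) (start : String) (word : String) (length : Int), Dom_bfs graph start word length → Pre_bfs graph start word length → Spec_bfs graph start word length (bfs graph start word length)

-- ===== LEMMAS AND PROOFS =====
-- (the equality of the two ports is in fact proved without using Pre_bfs: both ports
-- read a missing key as an empty neighbour list and a failed word index as a failed
-- goal test, which agree; Pre_bfs is what keeps the Python originals from raising)

-- the universe of vertices the search can ever move to
def pvU (graph : List (String × List String)) : List String := (graph.map Prod.snd).flatten

def pvNbrs (graph : List (String × List String)) (v : String) : List String :=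
  (PySem.Dict.mk graph).getD v []

-- measure: how many universe vertices are not yet on the path / in the visited set
def pvMu (graph : List (String × List String)) (p : List String) : Nat :=
  (((pvU graph).dedup).filter (fun x => !p.contains x)).length

lemma mem_pvNbrs {graph : List (String × List String)} {v x : String}
    (h : x ∈ pvNbrs graph v) : x ∈ pvU graph := by
  simp only [pvNbrs, PySem.Dict.getD_eq_get?_getD] at h
  induction graph with
  | nil => simp [PySem.Dict.get?] at h
  | cons hd tl ih =>
    obtain ⟨k, ns⟩ := hd
    rw [PySem.Dict.get?_mk_cons] at h
    by_cases hk : (k == v) = true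
    · simp only [hk, if_true, Option.getD_some] at h
      simp [pvU, h]
    · simp only [hk, Bool.false_eq_true, if_false] at h
      simp only [Bool.not_eq_true] at hk
      have := ih h
      simp [pvU] at this ⊢
      exact Or.inr this

lemma pvMu_lt {graph : List (String × List String)} {p p' : List String} {x : String}
    (hxU : x ∈ pvU graph) (hxp : x ∉ p) (hsub : ∀ y ∈ p, y ∈ p') (hxp' : x ∈ p') :
    pvMu graph p' < pvMu graph p := by
  have hxd : x ∈ (pvU graph).dedup := List.mem_dedup.mpr hxU
  obtain ⟨l1, l2, hsplit⟩ := List.mem_iff_append.mp hxd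
  have hmono : ∀ xs : List String,
      (xs.filter (fun z => !p'.contains z)).length ≤ (xs.filter (fun z => !p.contains z)).length := by
    intro xs
    rw [← List.countP_eq_length_filter, ← List.countP_eq_length_filter]
    apply List.countP_mono_left
    intro a _ ha
    simp only [Bool.not_eq_true', ← Bool.not_eq_true] at ha ⊢
    intro hmem
    exact ha (List.contains_iff_mem.mpr (hsub a (List.contains_iff_mem.mp hmem)))
  unfold pvMu
  rw [hsplit]
  simp only [List.filter_append, List.length_append, List.filter_cons]
  have h1 : (!p.contains x) = true := by
    simp only [Bool.not_eq_true', ← Bool.not_eq_true]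
    intro hmem
    exact hxp (List.contains_iff_mem.mp hmem)
  have h2 : (!p'.contains x) = false := by
    rw [List.contains_iff_mem.mpr hxp']
    rfl
  simp only [h1, h2, Bool.false_eq_true, if_false, if_true, List.length_cons]
  have := hmono l1
  have := hmono l2
  omega

-- membership in the candidate list 'set(graph[v]) - path'
lemma mem_cand {graph : List (String × List String)} {v x : String} {p : List String} :
    x ∈ PySem.Set.diff (PySem.Set.ofList (pvNbrs graph v)) p ↔ x ∈ pvNbrs graph v ∧ x ∉ p := by
  rw [PySem.Set.mem_diff, PySem.Set.mem_ofList]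

-- existence predicate that port A's queue computes, by well-founded recursion
def goodA (graph : List (String × List String)) (word : String) (length : Int)
    (v : String) (p : List String) : Bool :=
  (PySem.Set.diff (PySem.Set.ofList (pvNbrs graph v)) p).attach.any
    (fun x => hitA word length p x.1 || goodA graph word length x.1 (p ++ [x.1]))
termination_by pvMu graph p
decreasing_by
  rcases mem_cand.mp x.2 with ⟨hU, hp⟩
  exact pvMu_lt (mem_pvNbrs hU) hp (fun y hy => by simp [hy]) (by simp)

-- existence predicate that port B's stack computes
def goodB (graph : List (String × List String)) (word : String) (length : Int)
    (v : String) (vis : PySem.Set String) (d : Int) : Bool :=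
  if d = length - 1 then
    match PySem.Str.pyGet? word (length - 1) with
    | some c => PySem.Set.contains (PySem.Set.diff (PySem.Set.ofList (pvNbrs graph v)) vis) (String.singleton c)
    | none => false
  else
    (PySem.Set.diff (PySem.Set.ofList (pvNbrs graph v)) vis).attach.any
      (fun x => goodB graph word length x.1 (PySem.Set.add vis x.1) (d + 1))
termination_by pvMu graph vis
decreasing_by
  rcases mem_cand.mp x.2 with ⟨hU, hp⟩
  exact pvMu_lt (mem_pvNbrs hU) hp (fun y hy => by simp [PySem.Set.mem_add, hy]) (by simp [PySem.Set.mem_add])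

lemma goodA_eq (graph : List (String × List String)) (word : String) (length : Int)
    (v : String) (p : List String) :
    goodA graph word length v p =
      (PySem.Set.diff (PySem.Set.ofList (pvNbrs graph v)) p).any
        (fun n => hitA word length p n || goodA graph word length n (p ++ [n])) := by
  rw [goodA]
  simp only [List.any_subtype, List.unattach_attach]

lemma goodB_eq (graph : List (String × List String)) (word : String) (length : Int)
    (v : String) (vis : PySem.Set String) (d : Int) :
    goodB graph word length v vis d =
      if d = length - 1 then
        match PySem.Str.pyGet? word (length - 1) with
        | some c => PySem.Set.contains (PySem.Set.diff (PySem.Set.ofList (pvNbrs graph v)) vis) (String.singleton c)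
        | none => false
      else
        (PySem.Set.diff (PySem.Set.ofList (pvNbrs graph v)) vis).any
          (fun n => goodB graph word length n (PySem.Set.add vis n) (d + 1)) := by
  rw [goodB]
  simp only [List.any_subtype, List.unattach_attach]

-- queue / stack measures
def pvQM (graph : List (String × List String)) (q : List (String × List String)) : Nat :=
  (q.map (fun s => ((pvU graph).dedup.length + 1) ^ pvMu graph s.2)).sum

def pvQMB (graph : List (String × List String)) (st : List (String × PySem.Set String × Int)) : Nat :=
  (st.map (fun s => ((pvU graph).dedup.length + 1) ^ pvMu graph s.2.1)).sum

-- the child states cost strictly less than the popped state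
lemma pow_sum_bound (graph : List (String × List String)) (cs : List String)
    (g : String → Nat) (m : Nat)
    (hnodup : cs.Nodup) (hsub : ∀ n ∈ cs, n ∈ (pvU graph).dedup)
    (hlt : ∀ n ∈ cs, g n < m) :
    (cs.map (fun n => ((pvU graph).dedup.length + 1) ^ g n)).sum + 1
      ≤ ((pvU graph).dedup.length + 1) ^ m := by
  set B := (pvU graph).dedup.length with hB
  cases cs with
  | nil => simpa using Nat.one_le_pow m (B + 1) (by omega)
  | cons c cs' =>
    have hm : 1 ≤ m := by have := hlt c (by simp); omega
    have hX : 1 ≤ (B + 1) ^ (m - 1) := Nat.one_le_pow _ _ (by omega)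
    have hterm : ∀ y ∈ (c :: cs').map (fun n => (B + 1) ^ g n), y ≤ (B + 1) ^ (m - 1) := by
      intro y hy
      rcases List.mem_map.mp hy with ⟨n, hn, rfl⟩
      exact Nat.pow_le_pow_right (by omega) (by have := hlt n hn; omega)
    have hsum : ((c :: cs').map (fun n => (B + 1) ^ g n)).sum
        ≤ (c :: cs').length * (B + 1) ^ (m - 1) := by
      have := List.sum_le_card_nsmul _ _ hterm
      simpa using this
    have hlen : (c :: cs').length ≤ B := by
      have hd : (pvU graph).dedup.Nodup := (pvU graph).nodup_dedup
      have := (List.subperm_of_subset hnodup (fun x hx => hsub x hx)).length_le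
      exact this
    have hpow : (B + 1) ^ m = (B + 1) ^ (m - 1) * (B + 1) := by
      rw [← pow_succ]
      congr 1
      omega
    rw [hpow]
    calc ((c :: cs').map (fun n => (B + 1) ^ g n)).sum + 1
        ≤ (c :: cs').length * (B + 1) ^ (m - 1) + 1 := by omega
      _ ≤ B * (B + 1) ^ (m - 1) + 1 := by
          have := Nat.mul_le_mul_right ((B + 1) ^ (m - 1)) hlen
          omega
      _ ≤ (B + 1) ^ (m - 1) * (B + 1) := by nlinarith


lemma bfsScan_none (word : String) (length : Int) (p : List String)
    (cs : List String) (q : List (String × List String))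
    (h : ∃ n ∈ cs, hitA word length p n = true) :
    bfsScan word length p cs q = none := by
  induction cs generalizing q with
  | nil => simp at h
  | cons a cs ih =>
    rw [bfsScan]
    by_cases ha : hitA word length p a = true
    · simp [ha]
    · rw [if_neg ha]
      apply ih
      rcases h with ⟨n, hn, hhit⟩
      rcases List.mem_cons.mp hn with rfl | hn'
      · exact absurd hhit ha
      · exact ⟨n, hn', hhit⟩

lemma bfsScan_some (word : String) (length : Int) (p : List String)
    (cs : List String) (q : List (String × List String))
    (h : ∀ n ∈ cs, hitA word length p n = false) :
    bfsScan word length p cs q = some (q ++ cs.map (fun n => (n, p ++ [n]))) := by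
  induction cs generalizing q with
  | nil => simp [bfsScan]
  | cons a cs ih =>
    rw [bfsScan, if_neg (by simp [h a (by simp)])]
    rw [ih _ (fun n hn => h n (List.mem_cons_of_mem _ hn))]
    simp

lemma bfsLoop_eq (graph : List (String × List String)) (word : String) (length : Int) :
    ∀ (fuel : Nat) (q : List (String × List String)), pvQM graph q ≤ fuel →
    bfsLoop graph word length fuel q = q.any (fun s => goodA graph word length s.1 s.2) := by
  intro fuel
  induction fuel with
  | zero =>
    intro q h
    cases q with
    | nil => rfl
    | cons s rest =>
      exfalso
      have h2 : 0 < pvQM graph (s :: rest) := by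
        have h1 : 1 ≤ ((pvU graph).dedup.length + 1) ^ pvMu graph s.2 := Nat.one_le_pow _ _ (by omega)
        calc 0 < ((pvU graph).dedup.length + 1) ^ pvMu graph s.2 := h1
          _ ≤ pvQM graph (s :: rest) := by simp [pvQM]
      omega
  | succ fuel ih =>
    intro q h
    cases q with
    | nil => rfl
    | cons s rest =>
      obtain ⟨v, p⟩ := s
      rw [bfsLoop]
      by_cases hwin : ∃ n ∈ PySem.Set.diff (PySem.Set.ofList ((PySem.Dict.mk graph).getD v [])) p,
          hitA word length p n = true
      · rw [bfsScan_none _ _ _ _ _ hwin]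
        rcases hwin with ⟨n, hn, hh⟩
        have hg : goodA graph word length v p = true := by
          rw [goodA_eq]
          exact List.any_eq_true.mpr ⟨n, hn, by simp [hh]⟩
        simp [hg]
      · push Not at hwin
        have hwin' : ∀ n ∈ PySem.Set.diff (PySem.Set.ofList ((PySem.Dict.mk graph).getD v [])) p,
            hitA word length p n = false := fun n hn => Bool.eq_false_iff.mpr (hwin n hn)
        rw [bfsScan_some _ _ _ _ _ hwin']
        set cs := PySem.Set.diff (PySem.Set.ofList ((PySem.Dict.mk graph).getD v [])) p with hcs
        have hnodup : cs.Nodup := PySem.Set.nodup_diff _ _ (PySem.Set.nodup_ofList _)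
        have hsubU : ∀ n ∈ cs, n ∈ (pvU graph).dedup := by
          intro n hn
          rcases mem_cand.mp hn with ⟨h1, _⟩
          exact List.mem_dedup.mpr (mem_pvNbrs h1)
        have hltmu : ∀ n ∈ cs, pvMu graph (p ++ [n]) < pvMu graph p := by
          intro n hn
          rcases mem_cand.mp hn with ⟨h1, h2⟩
          exact pvMu_lt (mem_pvNbrs h1) h2 (fun y hy => by simp [hy]) (by simp)
        have hbound : (cs.map (fun n => ((pvU graph).dedup.length + 1) ^ pvMu graph (p ++ [n]))).sum + 1
            ≤ ((pvU graph).dedup.length + 1) ^ pvMu graph p :=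
          pow_sum_bound graph cs (fun n => pvMu graph (p ++ [n])) (pvMu graph p) hnodup hsubU hltmu
        have hsplit : pvQM graph ((v, p) :: rest)
            = ((pvU graph).dedup.length + 1) ^ pvMu graph p + pvQM graph rest := by
          simp [pvQM]
        have happ : pvQM graph (rest ++ cs.map (fun n => (n, p ++ [n])))
            = pvQM graph rest
              + (cs.map (fun n => ((pvU graph).dedup.length + 1) ^ pvMu graph (p ++ [n]))).sum := by
          simp [pvQM, List.map_append, List.map_map]
          rfl
        have hq' : pvQM graph (rest ++ cs.map (fun n => (n, p ++ [n]))) ≤ fuel := by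
          rw [happ]
          rw [hsplit] at h
          omega
        show bfsLoop graph word length fuel (rest ++ cs.map (fun n => (n, p ++ [n])))
          = ((v, p) :: rest).any fun s => goodA graph word length s.1 s.2
        rw [ih _ hq']
        rw [List.any_append]
        have hgood : goodA graph word length v p
            = cs.any (fun n => goodA graph word length n (p ++ [n])) := by
          rw [goodA_eq]
          apply PySem.List.any_congr_mem
          intro n hn
          simp [hwin' n hn]
        simp only [List.any_map, List.any_cons, hgood, Bool.or_comm]
        rfl

lemma foldl_cons_rev {α β : Type} (f : α → β) (l : List α) (st : List β) :
    l.foldl (fun st n => f n :: st) st = (l.map f).reverse ++ st := by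
  induction l generalizing st with
  | nil => simp
  | cons a l ih => simp [List.foldl_cons, ih]

lemma dlsLoop_eq (graph : List (String × List String)) (word : String) (length : Int) :
    ∀ (fuel : Nat) (st : List (String × PySem.Set String × Int)), pvQMB graph st ≤ fuel →
    dlsLoop graph word length fuel st = st.any (fun s => goodB graph word length s.1 s.2.1 s.2.2) := by
  intro fuel
  induction fuel with
  | zero =>
    intro st h
    cases st with
    | nil => rfl
    | cons s rest =>
      exfalso
      have h2 : 0 < pvQMB graph (s :: rest) := by
        have h1 : 1 ≤ ((pvU graph).dedup.length + 1) ^ pvMu graph s.2.1 := Nat.one_le_pow _ _ (by omega)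
        calc 0 < ((pvU graph).dedup.length + 1) ^ pvMu graph s.2.1 := h1
          _ ≤ pvQMB graph (s :: rest) := by simp [pvQMB]
      omega
  | succ fuel ih =>
    intro st h
    cases st with
    | nil => rfl
    | cons s rest =>
      obtain ⟨v, vis, d⟩ := s
      rw [dlsLoop]
      have hsplit : pvQMB graph ((v, vis, d) :: rest)
          = ((pvU graph).dedup.length + 1) ^ pvMu graph vis + pvQMB graph rest := by
        simp [pvQMB]
      have hpop : pvQMB graph rest ≤ fuel := by
        have h1 : 1 ≤ ((pvU graph).dedup.length + 1) ^ pvMu graph vis := Nat.one_le_pow _ _ (by omega)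
        omega
      by_cases hd : d = length - 1
      · rw [if_pos (by simp [hd])]
        cases hw : PySem.Str.pyGet? word (length - 1) with
        | none =>
          rw [ih _ hpop]
          have hgB : goodB graph word length v vis d = false := by
            rw [goodB_eq, if_pos hd, hw]
          simp only [List.any_cons, hgB, Bool.false_or]
        | some c =>
          have hgB : goodB graph word length v vis d
              = PySem.Set.contains ((PySem.Set.ofList ((PySem.Dict.mk graph).getD v [])).diff vis)
                  (String.singleton c) := by
            rw [goodB_eq, if_pos hd, hw]
            rfl
          show (if PySem.Set.contains ((PySem.Set.ofList ((PySem.Dict.mk graph).getD v [])).diff vis)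
                (String.singleton c) = true then true else dlsLoop graph word length fuel rest)
              = ((v, vis, d) :: rest).any fun s => goodB graph word length s.1 s.2.1 s.2.2
          by_cases hc : PySem.Set.contains ((PySem.Set.ofList ((PySem.Dict.mk graph).getD v [])).diff vis)
              (String.singleton c) = true
          · rw [if_pos hc]
            simp only [List.any_cons, hgB, hc, Bool.true_or]
          · rw [if_neg hc]
            rw [ih _ hpop]
            have hc' := Bool.eq_false_iff.mpr hc
            simp only [List.any_cons, hgB, hc', Bool.false_or]
      · rw [if_neg (by simp [hd])]
        rw [foldl_cons_rev]
        set cs := (PySem.Set.ofList ((PySem.Dict.mk graph).getD v [])).diff vis with hcs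
        have hnodup : cs.Nodup := PySem.Set.nodup_diff _ _ (PySem.Set.nodup_ofList _)
        have hsubU : ∀ n ∈ cs, n ∈ (pvU graph).dedup := by
          intro n hn
          rcases mem_cand.mp hn with ⟨h1, _⟩
          exact List.mem_dedup.mpr (mem_pvNbrs h1)
        have hltmu : ∀ n ∈ cs, pvMu graph (PySem.Set.add vis n) < pvMu graph vis := by
          intro n hn
          rcases mem_cand.mp hn with ⟨h1, h2⟩
          exact pvMu_lt (mem_pvNbrs h1) h2 (fun y hy => by simp [PySem.Set.mem_add, hy])
            (by simp [PySem.Set.mem_add])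
        have hbound : (cs.map (fun n => ((pvU graph).dedup.length + 1) ^ pvMu graph (PySem.Set.add vis n))).sum + 1
            ≤ ((pvU graph).dedup.length + 1) ^ pvMu graph vis :=
          pow_sum_bound graph cs (fun n => pvMu graph (PySem.Set.add vis n)) (pvMu graph vis)
            hnodup hsubU hltmu
        have happ : pvQMB graph ((cs.map (fun n => (n, PySem.Set.add vis n, d + 1))).reverse ++ rest)
            = pvQMB graph rest
              + (cs.map (fun n => ((pvU graph).dedup.length + 1) ^ pvMu graph (PySem.Set.add vis n))).sum := by
          simp only [pvQMB, List.map_append, List.map_reverse, List.map_map, List.sum_append,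
            List.sum_reverse]
          rw [Nat.add_comm]
          rfl
        have hq' : pvQMB graph ((cs.map (fun n => (n, PySem.Set.add vis n, d + 1))).reverse ++ rest) ≤ fuel := by
          rw [happ]
          omega
        rw [ih _ hq']
        rw [List.any_append, List.any_reverse]
        have hgB : goodB graph word length v vis d
            = cs.any (fun n => goodB graph word length n (PySem.Set.add vis n) (d + 1)) := by
          rw [goodB_eq, if_neg hd]
          rfl
        simp only [List.any_map, List.any_cons, hgB]
        rfl

-- once the path is at least `length` vertices long, A can never hit the goal test again
lemma goodA_dead (graph : List (String × List String)) (word : String) (length : Int) :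
    ∀ (N : Nat) (v : String) (p : List String), pvMu graph p ≤ N →
    1 ≤ p.length → length ≤ (p.length : Int) →
    goodA graph word length v p = false := by
  intro N
  induction N using Nat.strong_induction_on with
  | _ N ihN =>
    intro v p hmu h1 h2
    rw [goodA_eq]
    apply List.any_eq_false.mpr
    intro n hn
    rcases mem_cand.mp hn with ⟨hU, hp⟩
    have hmu' : pvMu graph (p ++ [n]) < pvMu graph p :=
      pvMu_lt (mem_pvNbrs hU) hp (fun y hy => by simp [hy]) (by simp)
    have hhit : hitA word length p n = false := by
      simp only [hitA, Bool.and_eq_false_iff]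
      left
      simp only [beq_eq_false_iff_ne, ne_eq]
      omega
    have hrec : goodA graph word length n (p ++ [n]) = false := by
      apply ihN (pvMu graph (p ++ [n])) (by omega) n (p ++ [n]) le_rfl
      · simp
      · simp only [List.length_append, List.length_cons, List.length_nil]
        push_cast
        omega
    simp [hhit, hrec]

-- once the depth is at least `length`, B's cutoff can never be reached again
lemma goodB_dead (graph : List (String × List String)) (word : String) (length : Int) :
    ∀ (N : Nat) (v : String) (vis : PySem.Set String) (d : Int), pvMu graph vis ≤ N →
    length ≤ d →
    goodB graph word length v vis d = false := by
  intro N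
  induction N using Nat.strong_induction_on with
  | _ N ihN =>
    intro v vis d hmu h2
    rw [goodB_eq, if_neg (by omega)]
    apply List.any_eq_false.mpr
    intro n hn
    rcases mem_cand.mp hn with ⟨hU, hp⟩
    have hmu' : pvMu graph (PySem.Set.add vis n) < pvMu graph vis :=
      pvMu_lt (mem_pvNbrs hU) hp (fun y hy => by simp [PySem.Set.mem_add, hy])
        (by simp [PySem.Set.mem_add])
    simp only [Bool.not_eq_true]
    exact ihN (pvMu graph (PySem.Set.add vis n)) (by omega) n (PySem.Set.add vis n) (d + 1)
      le_rfl (by omega)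

-- the bridge: A's all-depths predicate agrees with B's depth-limited one
lemma goodA_eq_goodB (graph : List (String × List String)) (word : String) (length : Int) :
    ∀ (N : Nat) (v : String) (p : List String) (vis : PySem.Set String), pvMu graph p ≤ N →
    (∀ x, x ∈ vis ↔ x ∈ p) → 1 ≤ p.length → (p.length : Int) ≤ length - 1 →
    goodA graph word length v p = goodB graph word length v vis (p.length : Int) := by
  intro N
  induction N using Nat.strong_induction_on with
  | _ N ihN =>
    intro v p vis hmu hvis h1 h2
    have hmemAB : ∀ x, (x ∈ PySem.Set.diff (PySem.Set.ofList (pvNbrs graph v)) p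
        ↔ x ∈ PySem.Set.diff (PySem.Set.ofList (pvNbrs graph v)) vis) := by
      intro x
      rw [mem_cand, mem_cand, hvis]
    by_cases hd : (p.length : Int) = length - 1
    · rw [goodA_eq, goodB_eq, if_pos hd]
      have hdead : ∀ n ∈ PySem.Set.diff (PySem.Set.ofList (pvNbrs graph v)) p,
          goodA graph word length n (p ++ [n]) = false := by
        intro n hn
        apply goodA_dead graph word length (pvMu graph (p ++ [n])) n (p ++ [n]) le_rfl
        · simp
        · simp only [List.length_append, List.length_cons, List.length_nil]
          push_cast
          omega
      cases hw : PySem.Str.pyGet? word (length - 1) with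
      | none =>
        apply List.any_eq_false.mpr
        intro n hn
        simp only [hitA, hw, Option.map_none, hdead n hn, Bool.or_false]
        simp
      | some c =>
        rw [Bool.eq_iff_iff]
        rw [List.any_eq_true, PySem.Set.contains_iff]
        constructor
        · rintro ⟨n, hn, hor⟩
          rcases Bool.or_eq_true_iff.mp hor with hhit | hg
          · simp only [hitA, hw, Bool.and_eq_true, beq_iff_eq, Option.map_some,
              Option.some.injEq] at hhit
            rw [hhit.2]
            exact (hmemAB n).mp hn
          · rw [hdead n hn] at hg
            exact absurd hg (by simp)
        · intro hmem
          refine ⟨String.singleton c, (hmemAB _).mpr hmem, ?_⟩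
          apply Bool.or_eq_true_iff.mpr
          left
          simp [hitA, hd]
          exact ⟨c, by simpa using hw, rfl⟩
    · have hd2 : (p.length : Int) ≠ length - 1 := hd
      rw [goodA_eq, goodB_eq, if_neg hd2]
      rw [Bool.eq_iff_iff, List.any_eq_true, List.any_eq_true]
      constructor
      · rintro ⟨n, hn, hor⟩
        rcases mem_cand.mp hn with ⟨hU, hp⟩
        rcases Bool.or_eq_true_iff.mp hor with hhit | hg
        · simp only [hitA, Bool.and_eq_true, beq_iff_eq] at hhit
          exact absurd hhit.1 hd2
        · refine ⟨n, (hmemAB n).mp hn, ?_⟩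
          have hmu' : pvMu graph (p ++ [n]) < pvMu graph p :=
            pvMu_lt (mem_pvNbrs hU) hp (fun y hy => by simp [hy]) (by simp)
          have hcast : ((p ++ [n]).length : Int) = (p.length : Int) + 1 := by
            simp only [List.length_append, List.length_cons, List.length_nil]
            push_cast
            omega
          have hrec := ihN (pvMu graph (p ++ [n])) (by omega) n (p ++ [n]) (PySem.Set.add vis n)
            le_rfl (by intro x; rw [PySem.Set.mem_add]; simp [hvis, List.mem_append]) (by simp)
            (by rw [hcast]; omega)
          rw [hcast] at hrec
          rw [← hrec]
          exact hg
      · rintro ⟨n, hn, hg⟩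
        rcases mem_cand.mp ((hmemAB n).mpr hn) with ⟨hU, hp⟩
        refine ⟨n, (hmemAB n).mpr hn, ?_⟩
        apply Bool.or_eq_true_iff.mpr
        right
        have hmu' : pvMu graph (p ++ [n]) < pvMu graph p :=
          pvMu_lt (mem_pvNbrs hU) hp (fun y hy => by simp [hy]) (by simp)
        have hcast : ((p ++ [n]).length : Int) = (p.length : Int) + 1 := by
          simp only [List.length_append, List.length_cons, List.length_nil]
          push_cast
          omega
        have hrec := ihN (pvMu graph (p ++ [n])) (by omega) n (p ++ [n]) (PySem.Set.add vis n)
          le_rfl (by intro x; rw [PySem.Set.mem_add]; simp [hvis, List.mem_append]) (by simp)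
          (by rw [hcast]; omega)
        rw [hcast] at hrec
        rw [hrec]
        exact hg

-- ===== VERDICT (by name: the statement is the Claim_ definition above) =====
theorem bfs_spec : Claim_equal_bfs := by
  intro graph start word length hDom hPre
  unfold Spec_bfs bfs bfs_alt
  have hmu_le : ∀ l : List String, pvMu graph l ≤ (pvU graph).dedup.length :=
    fun l => List.length_filter_le _ _
  have hfuelA : pvQM graph [(start, [start])] ≤ pvSearchFuel graph := by
    have hq : pvQM graph [(start, [start])]
        = ((pvU graph).dedup.length + 1) ^ pvMu graph [start] := by
      simp [pvQM]
    rw [hq]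
    unfold pvSearchFuel
    exact Nat.pow_le_pow_right (by omega)
      (by have := hmu_le [start]; unfold pvU at this; omega)
  rw [bfsLoop_eq graph word length _ _ hfuelA]
  have hfuelB : pvQMB graph [(start, PySem.Set.ofList [start], 1)] ≤ pvSearchFuel graph := by
    have hq : pvQMB graph [(start, PySem.Set.ofList [start], 1)]
        = ((pvU graph).dedup.length + 1) ^ pvMu graph (PySem.Set.ofList [start]) := by
      simp [pvQMB]
    rw [hq]
    unfold pvSearchFuel
    exact Nat.pow_le_pow_right (by omega)
      (by have := hmu_le (PySem.Set.ofList [start]); unfold pvU at this; omega)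
  rw [dlsLoop_eq graph word length _ _ hfuelB]
  simp only [List.any_cons, List.any_nil, Bool.or_false]
  by_cases hlen : length < 2
  · rw [goodA_dead graph word length (pvMu graph [start]) start [start] le_rfl (by simp)
      (by simp; omega)]
    rw [goodB_dead graph word length (pvMu graph (PySem.Set.ofList [start])) start
      (PySem.Set.ofList [start]) 1 le_rfl (by omega)]
  · have hbr := goodA_eq_goodB graph word length (pvMu graph [start]) start [start]
      (PySem.Set.ofList [start]) le_rfl (by intro x; simp [PySem.Set.mem_ofList]) (by simp)
      (by simp; omega)
    simpa using hbr
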